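-- pv_equiv track=rewrite | github.com/Jianxun/ASDL | src/asdl/ir/converters/ast_to_graphir_axis.py | _scan_group_tokens
-- ===== SOURCE A (Python) =====
-- from typing import Dict, List, Optional, Tuple
--
-- def _scan_group_tokens(
--     expression: str,
-- ) -> Tuple[List[Tuple[int, int, str, Optional[str]]], bool]:
--     """Scan expression text for pattern group tokens.
--
--     Args:
--         expression: Expression text to scan.
--
--     Returns:
--         Tuple of (token tuples, has_splice) where each token tuple contains
--         (start, end, token_text, named_pattern_name).
--     """
--     tokens: List[Tuple[int, int, str, Optional[str]]] = []
--     has_splice = False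
--     index = 0
--     while index < len(expression):
--         char = expression[index]
--         if char == "<":
--             close = expression.find(">", index + 1)
--             if close == -1:
--                 break
--             token = expression[index : close + 1]
--             name = token[2:-1] if token.startswith("<@") else None
--             tokens.append((index, close + 1, token, name))
--             index = close + 1
--             continue
--         if char == ";":
--             has_splice = True
--         index += 1
--     return tokens, has_splice
-- ===== SOURCE B (Python) =====
-- from typing import Dict, List, Optional, Tuple
--
-- def _scan_group_tokens(
--     expression: str,
-- ) -> Tuple[List[Tuple[int, int, str, Optional[str]]], bool]:
--     """Chunk-based scan driven by str.partition instead of manual index bookkeeping."""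
--     tokens: List[Tuple[int, int, str, Optional[str]]] = []
--     has_splice = False
--     pos = 0
--     rest = expression
--     while True:
--         pre, lt, rest = rest.partition("<")
--         has_splice = has_splice or ";" in pre
--         if not lt:
--             return tokens, has_splice
--         pos += len(pre)
--         body, gt, rest = rest.partition(">")
--         if not gt:
--             return tokens, has_splice
--         token = "<" + body + ">"
--         name = body[1:] if body.startswith("@") else None
--         tokens.append((pos, pos + len(body) + 2, token, name))
--         pos += len(body) + 2
-- ===== Notes on version B (the rewrite author's own statement) =====
-- stated objective: faster
-- what changed: Replaced the char-by-char index loop with str.find bookkeeping by a chunk-based scan driven by str.partition: each iteration splits off the text before the next '<', tests ';' membership on that chunk at once, then partitions off the token body at the next '>'.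
import Mathlib
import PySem

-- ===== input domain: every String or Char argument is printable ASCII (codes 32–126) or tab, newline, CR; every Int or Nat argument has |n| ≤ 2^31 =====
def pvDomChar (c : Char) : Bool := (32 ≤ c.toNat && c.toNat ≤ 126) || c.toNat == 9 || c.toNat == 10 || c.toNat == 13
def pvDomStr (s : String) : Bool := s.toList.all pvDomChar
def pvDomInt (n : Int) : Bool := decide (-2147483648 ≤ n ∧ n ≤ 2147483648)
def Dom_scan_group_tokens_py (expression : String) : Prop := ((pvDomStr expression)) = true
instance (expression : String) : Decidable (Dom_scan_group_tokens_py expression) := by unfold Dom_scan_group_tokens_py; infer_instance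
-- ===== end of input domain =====

-- B replaces A's char-by-char index loop by a partition-driven chunk scan (same return value,
-- measured faster in Python since str.partition/'in' scan chunks at C speed).



-- ===== PORT A =====
-- literal port of A's while-loop: Nat index, expression.find(">", index+1) via PySem.Chars.findFrom
def aGo_scan (cs : List Char) (index : Nat)
    (tokens : List (Int × Int × String × Option String)) (hs : Bool) :
    (List (Int × Int × String × Option String)) × Bool :=
  if h : index < cs.length then
    let char := cs[index]
    if char = '<' then
      let close := PySem.Chars.findFrom cs ['>'] ((index : Int) + 1) none
      if hc : close = -1 then (tokens, hs)
      else
        let token := PySem.Chars.slice cs (some (index : Int)) (some (close + 1))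
        let name : Option String :=
          if PySem.Chars.startswith token ['<', '@'] then
            some (String.ofList (PySem.Chars.slice token (some 2) (some (-1))))
          else none
        aGo_scan cs (close + 1).toNat
          (tokens ++ [((index : Int), close + 1, String.ofList token, name)]) hs
    else
      aGo_scan cs (index + 1) tokens (if char = ';' then true else hs)
  else (tokens, hs)
termination_by cs.length - index
decreasing_by
  · have hk : (index : Int) + 1 = ((index + 1 : Nat) : Int) := by push_cast; ring
    have hspec := PySem.Chars.findFrom_natCast_spec cs ['>'] (index + 1)
      (by omega) (by rw [← hk]; exact hc)
    have h1 : ((index + 1 : Nat) : Int) ≤ PySem.Chars.findFrom cs ['>'] ((index : Int) + 1) none := by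
      rw [hk]; exact hspec.1
    omega
  · omega

def scan_group_tokens_py (expression : String) : (List (Int × Int × String × Option String)) × Bool :=
  aGo_scan expression.toList 0 [] false

-- ===== PORT B =====
-- literal port of B's partition loop; str.partition on a single-char separator is
-- exactly takeWhile/dropWhile at that char (separator found iff the drop part is nonempty)
def bGo_scan (rest : List Char) (pos : Int)
    (tokens : List (Int × Int × String × Option String)) (hs : Bool) :
    (List (Int × Int × String × Option String)) × Bool :=
  let pre := rest.takeWhile (fun c => c ≠ '<')
  let dw := rest.dropWhile (fun c => c ≠ '<')
  let hs1 := hs || PySem.Chars.isIn [';'] pre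
  if h1 : dw.isEmpty then (tokens, hs1)
  else
    let pos1 := pos + pre.length
    let r1 := dw.tail
    let body := r1.takeWhile (fun c => c ≠ '>')
    let dw2 := r1.dropWhile (fun c => c ≠ '>')
    if h2 : dw2.isEmpty then (tokens, hs1)
    else
      let token := '<' :: (body ++ ['>'])
      let name : Option String :=
        if PySem.Chars.startswith body ['@'] then
          some (String.ofList (PySem.Chars.slice body (some 1) none))
        else none
      bGo_scan dw2.tail (pos1 + body.length + 2)
        (tokens ++ [(pos1, pos1 + (body.length : Int) + 2, String.ofList token, name)]) hs1
termination_by rest.length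
decreasing_by
  have hdd : dw = rest.dropWhile (fun c => c ≠ '<') := rfl
  have hr1 : r1 = dw.tail := rfl
  have hdd2 : dw2 = r1.dropWhile (fun c => c ≠ '>') := rfl
  rw [hdd2, hr1, hdd] at h2
  rw [hdd] at h1
  have e1 := congrArg List.length
    (List.takeWhile_append_dropWhile (p := fun c => c ≠ '<') (l := rest))
  have e2 := congrArg List.length
    (List.takeWhile_append_dropWhile (p := fun c => c ≠ '>')
      (l := (rest.dropWhile (fun c => c ≠ '<')).tail))
  simp only [List.length_append] at e1 e2
  simp only [List.isEmpty_iff_length_eq_zero] at h1 h2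
  have h5 := List.length_tail (l := rest.dropWhile (fun c => c ≠ '<'))
  have h6 := List.length_tail
    (l := (rest.dropWhile (fun c => c ≠ '<')).tail.dropWhile (fun c => c ≠ '>'))
  omega

def scan_group_tokens_py_alt (expression : String) : (List (Int × Int × String × Option String)) × Bool :=
  bGo_scan expression.toList 0 [] false

-- ===== PRECONDITION & SPEC =====
def Spec_scan_group_tokens_py (expression : String) (out : (List (Int × Int × String × Option String)) × Bool) : Prop := out = scan_group_tokens_py_alt expression
instance (expression : String) (out : (List (Int × Int × String × Option String)) × Bool) : Decidable (Spec_scan_group_tokens_py expression out) := by unfold Spec_scan_group_tokens_py; infer_instance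

-- ===== CLAIM (what is proved, stated in full; the proofs are below) =====
def Claim_equal_scan_group_tokens_py : Prop := ∀ (expression : String), Dom_scan_group_tokens_py expression → Spec_scan_group_tokens_py expression (scan_group_tokens_py expression)

-- ===== LEMMAS AND PROOFS =====
-- singleton prefix is a head test
lemma pv_prefix_singleton {c : Char} {l : List Char} : [c] <+: l ↔ l.head? = some c := by
  cases l with
  | nil => simp
  | cons a t => simp [List.cons_prefix_cons, eq_comm]

-- 'c in l' for a one-char needle is list membership
lemma pv_isIn_singleton (c : Char) (l : List Char) :
    PySem.Chars.isIn [c] l = l.contains c := by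
  by_cases hm : c ∈ l
  · rw [(PySem.Chars.isIn_iff_infix [c] l).mpr ((List.singleton_infix_iff c l).mpr hm)]
    simp [hm]
  · rw [(PySem.Chars.isIn_eq_false_iff [c] l).mpr (by
      rw [List.singleton_infix_iff]; exact hm)]
    simp [hm]

-- the dropWhile-at-c part of a list containing c starts with c
lemma pv_dropWhile_mem {c : Char} {l : List Char} (hm : c ∈ l) :
    ∃ r, l.dropWhile (fun x => x ≠ c) = c :: r := by
  cases h : l.dropWhile (fun x => x ≠ c) with
  | nil => exact absurd ((List.dropWhile_eq_nil_iff).mp h c hm) (by simp)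
  | cons a r =>
    have hne : l.dropWhile (fun x => x ≠ c) ≠ [] := by rw [h]; simp
    have hh := List.head_dropWhile_not (fun x => x ≠ c) hne
    have hha : (l.dropWhile (fun x => x ≠ c)).head hne = a := by
      simp only [List.head_eq_iff_head?_eq_some, h, List.head?_cons]
    rw [hha] at hh
    simp at hh
    exact ⟨r, by rw [hh]⟩

-- s.find(c) of a present char is the length of the takeWhile-(≠ c) prefix
lemma pv_find_char_mem {c : Char} {l : List Char} (hm : c ∈ l) :
    PySem.Chars.find l [c] = ((l.takeWhile (fun x => x ≠ c)).length : Int) := by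
  set tw := l.takeWhile (fun x => x ≠ c) with htw
  obtain ⟨r, hr⟩ := pv_dropWhile_mem hm
  have hsplit : tw ++ c :: r = l := by rw [htw, ← hr]; exact List.takeWhile_append_dropWhile
  have hnn : 0 ≤ PySem.Chars.find l [c] :=
    (PySem.Chars.find_nonneg_iff l [c]).mpr ((List.singleton_infix_iff c l).mpr hm)
  obtain ⟨hpre, hmin⟩ := PySem.Chars.find_spec hnn
  set f := (PySem.Chars.find l [c]).toNat with hf
  -- l[f]? = some c
  have hfc : l[f]? = some c := by
    rw [← List.head?_drop]; exact pv_prefix_singleton.mp hpre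
  -- l[i]? ≠ some c for i < f
  have hfmin : ∀ i, i < f → l[i]? ≠ some c := by
    intro i hi hic
    exact hmin i hi (pv_prefix_singleton.mpr (by rw [List.head?_drop]; exact hic))
  -- l[tw.length]? = some c
  have hnc : l[tw.length]? = some c := by
    rw [← hsplit, List.getElem?_append_right (le_refl _)]
    simp
  -- l[i]? ≠ some c for i < tw.length
  have hnmin : ∀ i, i < tw.length → l[i]? ≠ some c := by
    intro i hi hic
    have h2 : i < l.length := (List.getElem?_eq_some_iff.mp hic).1
    have h1 : tw[i] = l[i] := (List.takeWhile_prefix _).getElem hi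
    have h3 : l[i] = c := by
      have := List.getElem?_eq_getElem h2
      rw [this] at hic; exact Option.some.inj hic
    have h4 := List.mem_takeWhile_imp (l := l) (p := fun x => x ≠ c) (x := tw[i]) (by
      rw [htw] at *; exact List.getElem_mem hi)
    rw [h1, h3] at h4; simp at h4
  have : f = tw.length := by
    rcases Nat.lt_trichotomy f tw.length with h | h | h
    · exact absurd hfc (hnmin f h)
    · exact h
    · exact absurd hnc (hfmin _ h)
  rw [← Int.toNat_of_nonneg hnn, ← hf, this]

lemma pv_find_char_not_mem {c : Char} {l : List Char} (hm : c ∉ l) :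
    PySem.Chars.find l [c] = -1 := by
  rw [PySem.Chars.find_eq_neg_one_iff, List.singleton_infix_iff]; exact hm

-- A's loop scans the '<'-free prefix one char at a time, only updating the splice flag
lemma pv_aGo_pre (cs : List Char) :
    ∀ pre index toks hs, pre = (cs.drop index).takeWhile (fun c => c ≠ '<') →
      aGo_scan cs index toks hs =
        aGo_scan cs (index + pre.length) toks (hs || pre.contains ';') := by
  intro pre
  induction pre with
  | nil => intro index toks hs _; simp
  | cons p0 pre' ih =>
    intro index toks hs hpre
    have hlt : index < cs.length := by
      by_contra h
      rw [List.drop_eq_nil_of_le (by omega)] at hpre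
      simp at hpre
    have hdrop : cs.drop index = cs[index] :: cs.drop (index + 1) :=
      List.drop_eq_getElem_cons hlt
    rw [hdrop, List.takeWhile_cons] at hpre
    by_cases h0 : cs[index] = '<'
    · simp [h0] at hpre
    · rw [if_pos (by simp [h0])] at hpre
      obtain ⟨he, hrest⟩ : p0 = cs[index] ∧ pre' = (cs.drop (index + 1)).takeWhile (fun c => c ≠ '<') := by
        exact ⟨(List.cons.injEq _ _ _ _ ▸ hpre).1, (List.cons.injEq _ _ _ _ ▸ hpre).2⟩
      rw [aGo_scan, dif_pos hlt, if_neg h0, ih (index + 1) toks _ hrest]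
      congr 1
      · simp [List.length_cons]; omega
      · rw [List.contains_cons, he]
        by_cases hsc : cs[index] = ';'
        · simp [hsc]
        · have hb : (';' == cs[index]) = false :=
            beq_eq_false_iff_ne.mpr (fun h => hsc h.symm)
          simp [hsc, hb]


-- head of a nonempty dropWhile fails the predicate
lemma pv_dropWhile_head {p : Char → Bool} {l : List Char} {a : Char} {r : List Char}
    (h : l.dropWhile p = a :: r) : p a = false := by
  have hne : l.dropWhile p ≠ [] := by rw [h]; simp
  have hh := List.head_dropWhile_not p hne
  have hha : (l.dropWhile p).head hne = a := by
    simp only [List.head_eq_iff_head?_eq_some, h, List.head?_cons]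
  rw [hha] at hh; exact hh

-- the two loops agree: A at absolute index, B on the corresponding suffix
lemma pv_main (cs : List Char) :
    ∀ fuel index toks hs, cs.length - index ≤ fuel → index ≤ cs.length →
      aGo_scan cs index toks hs = bGo_scan (cs.drop index) (index : Int) toks hs := by
  intro fuel
  induction fuel with
  | zero =>
    intro index toks hs h0 hle
    have hidx : index = cs.length := by omega
    have hdrop : cs.drop index = [] := List.drop_eq_nil_of_le (by omega)
    rw [hdrop, aGo_scan, dif_neg (by omega), bGo_scan.eq_def]
    simp [pv_isIn_singleton]
  | succ f ih =>
    intro index toks hs hfuel hle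
    rw [pv_aGo_pre cs ((cs.drop index).takeWhile (fun c => c ≠ '<')) index toks hs rfl,
        bGo_scan.eq_def]
    simp only [pv_isIn_singleton]
    rcases heq : (cs.drop index).dropWhile (fun c => c ≠ '<') with _ | ⟨c1, r1⟩
    · -- no '<' remains
      have hsplit : (cs.drop index).takeWhile (fun c => c ≠ '<') = cs.drop index := by
        conv_rhs => rw [← List.takeWhile_append_dropWhile (p := fun c => c ≠ '<') (l := cs.drop index)]
        rw [heq, List.append_nil]
      rw [aGo_scan, dif_neg (by
        rw [hsplit, List.length_drop]; omega)]
      simp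
    · rw [dif_neg (by simp)]
      simp only [List.tail_cons]
      have hc1 : c1 = '<' := by
        have := pv_dropWhile_head heq; simpa using this
      subst hc1
      set tw := (cs.drop index).takeWhile (fun c => c ≠ '<') with htw
      have hsplit : tw ++ '<' :: r1 = cs.drop index := by
        rw [htw, ← heq]; exact List.takeWhile_append_dropWhile
      have hlen : (cs.drop index).length = tw.length + 1 + r1.length := by
        have := congrArg List.length hsplit
        simp only [List.length_append, List.length_cons] at this
        omega
      have hld : (cs.drop index).length = cs.length - index := by simp
      have hidx : index + tw.length < cs.length := by omega
      have hdropn : cs.drop (index + tw.length) = '<' :: r1 := by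
        have h1 : List.drop tw.length (cs.drop index) = '<' :: r1 := by
          conv_lhs => rw [← hsplit]
          exact List.drop_left
        rw [List.drop_drop] at h1
        exact h1
      have hdropn1 : cs.drop (index + tw.length + 1) = r1 := by
        have h1 := congrArg (List.drop 1) hdropn
        rw [List.drop_drop] at h1
        simpa using h1
      have hchar : cs[index + tw.length] = '<' := by
        have h1 := List.drop_eq_getElem_cons hidx
        rw [hdropn] at h1
        exact (List.cons.injEq _ _ _ _ ▸ h1).1.symm
      rw [aGo_scan]
      rw [dif_pos hidx]
      simp only [hchar, if_pos]
      have hcast : ((index + tw.length : Nat) : Int) + 1 = ((index + tw.length + 1 : Nat) : Int) := by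
        push_cast; ring
      rw [hcast, PySem.Chars.findFrom_natCast cs ['>'] (index + tw.length + 1) (by omega), hdropn1]
      by_cases hgt : '>' ∈ r1
      · -- a closing '>' exists: one token is emitted on both sides
        obtain ⟨r3', hdw2⟩ := pv_dropWhile_mem hgt
        have hsplit2 : r1.takeWhile (fun c => c ≠ '>') ++ '>' :: r3' = r1 := by
          rw [← hdw2]; exact List.takeWhile_append_dropWhile
        rw [pv_find_char_mem hgt]
        set bdy := r1.takeWhile (fun c => c ≠ '>') with hbdy
        have hneg : ¬((bdy.length : Int) = -1) := by omega
        simp only [if_neg hneg]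
        rw [dif_neg (by omega)]
        rw [hdw2]
        rw [dif_neg (by simp)]
        simp only [List.tail_cons]
        · have hlen2 : r1.length = bdy.length + 1 + r3'.length := by
            have := congrArg List.length hsplit2
            simp only [List.length_append, List.length_cons] at this
            omega
          have htoknat : ((((index + tw.length + 1 : Nat) : Int)) + (bdy.length : Int) + 1).toNat
              = index + tw.length + bdy.length + 2 := by omega
          rw [htoknat]
          have htok : PySem.Chars.slice cs (some ((index + tw.length : Nat) : Int))
              (some (((index + tw.length + 1 : Nat) : Int) + (bdy.length : Int) + 1))
              = '<' :: (bdy ++ ['>']) := by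
            have hb : (((index + tw.length + 1 : Nat) : Int) + (bdy.length : Int) + 1)
                = ((index + tw.length : Nat) : Int) + ((bdy.length + 2 : Nat) : Int) := by
              push_cast; ring
            rw [hb]
            simp only [PySem.Chars.slice_eq_listSlice, PySem.List.slice_natCast_add]
            rw [hdropn]
            have h5 : List.take (bdy.length + 2) ('<' :: r1) = '<' :: List.take (bdy.length + 1) r1 := by
              simp [List.take_succ_cons]
            rw [h5, ← hsplit2, List.take_append, List.take_of_length_le (by omega)]
            simp
          rw [htok]
          have hname : (if PySem.Chars.startswith ('<' :: (bdy ++ ['>'])) ['<', '@'] = true then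
                some (String.ofList (PySem.Chars.slice ('<' :: (bdy ++ ['>'])) (some 2) (some (-1))))
              else none)
              = (if PySem.Chars.startswith bdy ['@'] = true then
                some (String.ofList (PySem.Chars.slice bdy (some 1) none))
              else none) := by
            clear_value bdy
            rcases bdy with _ | ⟨b, bs⟩
            · rfl
            · by_cases hb : b = '@'
              · subst hb
                rw [if_pos (by
                    rw [PySem.Chars.startswith_iff]
                    simp [List.cons_prefix_cons]),
                  if_pos (by
                    rw [PySem.Chars.startswith_iff]
                    simp [List.cons_prefix_cons])]
                congr 1
                apply congrArg
                have h1 : PySem.Chars.slice ('<' :: ('@' :: bs ++ ['>'])) (some 2) (some (-1))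
                    = bs := by
                  simp only [PySem.Chars.slice_eq_listSlice]
                  have h6 : '<' :: ('@' :: bs ++ ['>']) = '<' :: '@' :: (bs ++ ['>']) := by simp
                  rw [h6]
                  simp [PySem.List.slice]
                have h2 : PySem.Chars.slice ('@' :: bs) (some 1) none = bs := by
                  simp only [PySem.Chars.slice_eq_listSlice]
                  rw [PySem.List.slice_from_one]
                  rfl
                rw [h1, h2]
              · rw [if_neg (by
                    rw [PySem.Chars.startswith_iff]
                    simp [List.cons_prefix_cons]
                    intro h
                    exact absurd h.symm hb),
                  if_neg (by
                    rw [PySem.Chars.startswith_iff]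
                    simp [List.cons_prefix_cons]
                    intro h
                    exact absurd h.symm hb)]
          rw [hname]
          have hdrop3 : cs.drop (index + tw.length + bdy.length + 2) = r3' := by
            have h2' : List.drop (bdy.length + 2) ('<' :: r1) = r3' := by
              rw [show bdy.length + 2 = (bdy.length + 1) + 1 by omega, List.drop_succ_cons,
                ← hsplit2, List.drop_append,
                List.drop_eq_nil_of_le (Nat.le_succ _)]
              simp
            have h1 := congrArg (List.drop (bdy.length + 2)) hdropn
            rw [List.drop_drop, h2'] at h1
            rw [show index + tw.length + bdy.length + 2
                = index + tw.length + (bdy.length + 2) by omega]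
            exact h1
          rw [ih (index + tw.length + bdy.length + 2) _ _ (by omega) (by omega), hdrop3]
          have e1 : ((index + tw.length : Nat) : Int) = (index : Int) + (tw.length : Int) := by
            push_cast; ring
          have e2 : (((index + tw.length + 1 : Nat) : Int)) + (bdy.length : Int) + 1
              = (index : Int) + (tw.length : Int) + (bdy.length : Int) + 2 := by
            push_cast; ring
          have e3 : ((index + tw.length + bdy.length + 2 : Nat) : Int)
              = (index : Int) + (tw.length : Int) + (bdy.length : Int) + 2 := by
            push_cast; ring
          rw [e1, e2, e3]
      · -- no closing '>': both sides stop, keeping the splice flag seen so far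
        rw [pv_find_char_not_mem hgt]
        rw [if_pos rfl, dif_pos rfl]
        have hdw2 : r1.dropWhile (fun c => c ≠ '>') = [] :=
          List.dropWhile_eq_nil_iff.mpr (by
            intro x hx
            simp
            intro h
            exact hgt (h ▸ hx))
        rw [hdw2]
        rw [dif_pos (by simp)]

-- ===== VERDICT (by name: the statement is the Claim_ definition above) =====
theorem scan_group_tokens_py_spec : Claim_equal_scan_group_tokens_py := by
  intro e _
  unfold Spec_scan_group_tokens_py scan_group_tokens_py scan_group_tokens_py_alt
  have h := pv_main e.toList e.toList.length 0 [] false (by omega) (by omega)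
  simpa using h
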